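-- pv_equiv track=rewrite | github.com/lnithin/AI-Based-Dietary-Monitoring-and-Biometric-Health-Prediction | ml-services/recommendation_service/app.py | _filter_by_conditions
-- ===== SOURCE A (Python) =====
-- from typing import List, Dict, Tuple
--
-- def _filter_by_conditions(meals: List[Dict], conditions: List[str]) -> List[Dict]:
--     """Filter meals based on health conditions"""
--     filtered = meals
--
--     if "diabetes" in conditions:
--         # Prefer low glycemic index meals
--         filtered = [m for m in filtered if m.get("sugar_g", 0) < 20 and m.get("fiber_g", 0) > 3]
--
--     if "hypertension" in conditions:
--         # Prefer low sodium meals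
--         filtered = [m for m in filtered if m.get("sodium_mg", 0) < 500]
--
--     if "high_cholesterol" in conditions:
--         # Prefer low saturated fat
--         filtered = [m for m in filtered if m.get("fat_g", 0) < 15]
--
--     return filtered if filtered else meals
-- ===== SOURCE B (Python) =====
-- def _filter_by_conditions(meals, conditions):
--     """Filter meals based on health conditions (single pass, precomputed flags)."""
--     has_diabetes = "diabetes" in conditions
--     has_hyper = "hypertension" in conditions
--     has_chol = "high_cholesterol" in conditions
--
--     def ok(m):
--         if has_diabetes and not (m.get("sugar_g", 0) < 20 and m.get("fiber_g", 0) > 3):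
--             return False
--         if has_hyper and m.get("sodium_mg", 0) >= 500:
--             return False
--         if has_chol and m.get("fat_g", 0) >= 15:
--             return False
--         return True
--
--     filtered = [m for m in meals if ok(m)]
--     return filtered if filtered else meals
-- ===== Notes on version B (the rewrite author's own statement) =====
-- stated objective: alternative
-- what changed: Replaces up to three sequential list-rebuilding passes with three precomputed condition flags and a single pass keeping a meal only if every active threshold predicate holds; same empty-fallback.
import Mathlib
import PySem

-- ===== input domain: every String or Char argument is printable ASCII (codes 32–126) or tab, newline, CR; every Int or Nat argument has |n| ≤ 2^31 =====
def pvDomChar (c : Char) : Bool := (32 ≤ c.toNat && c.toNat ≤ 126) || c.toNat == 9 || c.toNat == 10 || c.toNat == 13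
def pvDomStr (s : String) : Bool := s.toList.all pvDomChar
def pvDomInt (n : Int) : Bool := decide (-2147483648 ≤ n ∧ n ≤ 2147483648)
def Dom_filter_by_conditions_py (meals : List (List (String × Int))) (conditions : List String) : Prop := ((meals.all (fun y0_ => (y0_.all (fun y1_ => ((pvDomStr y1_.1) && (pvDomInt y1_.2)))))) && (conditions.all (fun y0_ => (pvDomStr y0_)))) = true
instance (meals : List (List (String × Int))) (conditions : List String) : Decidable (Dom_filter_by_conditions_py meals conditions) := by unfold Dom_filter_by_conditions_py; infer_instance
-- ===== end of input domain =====

-- B replaces A's up-to-three sequential filtering passes with precomputed condition flags and a single pass (objective: alternative; same cost).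


-- ===== PORT A =====
-- m.get(key, 0) on a Python dict, exact via PySem.Dict (first-match lookup, default 0)
def pvGet0 (m : List (String × Int)) (k : String) : Int := (PySem.Dict.mk m).getD k 0

def filter_by_conditions_py (meals : List (List (String × Int))) (conditions : List String) : List (List (String × Int)) :=
  let filtered := meals
  let filtered := if conditions.contains "diabetes" then
      filtered.filter (fun m => decide (pvGet0 m "sugar_g" < 20) && decide (pvGet0 m "fiber_g" > 3))
    else filtered
  let filtered := if conditions.contains "hypertension" then
      filtered.filter (fun m => decide (pvGet0 m "sodium_mg" < 500))
    else filtered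
  let filtered := if conditions.contains "high_cholesterol" then
      filtered.filter (fun m => decide (pvGet0 m "fat_g" < 15))
    else filtered
  if filtered.isEmpty then meals else filtered

-- ===== PORT B =====
-- B's ok(m): sequential early-return checks guarded by the precomputed flags
def pvMealOk (hd hh hc : Bool) (m : List (String × Int)) : Bool :=
  if hd && !(decide (pvGet0 m "sugar_g" < 20) && decide (pvGet0 m "fiber_g" > 3)) then false
  else if hh && decide (500 ≤ pvGet0 m "sodium_mg") then false
  else if hc && decide (15 ≤ pvGet0 m "fat_g") then false
  else true

def filter_by_conditions_py_alt (meals : List (List (String × Int))) (conditions : List String) : List (List (String × Int)) :=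
  let hd := conditions.contains "diabetes"
  let hh := conditions.contains "hypertension"
  let hc := conditions.contains "high_cholesterol"
  let filtered := meals.filter (pvMealOk hd hh hc)
  if filtered.isEmpty then meals else filtered

-- ===== PRECONDITION & SPEC =====
def Spec_filter_by_conditions_py (meals : List (List (String × Int))) (conditions : List String) (out : List (List (String × Int))) : Prop := out = filter_by_conditions_py_alt meals conditions
instance (meals : List (List (String × Int))) (conditions : List String) (out : List (List (String × Int))) : Decidable (Spec_filter_by_conditions_py meals conditions out) := by unfold Spec_filter_by_conditions_py; infer_instance

-- ===== CLAIM (what is proved, stated in full; the proofs are below) =====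
def Claim_equal_filter_by_conditions_py : Prop := ∀ (meals : List (List (String × Int))) (conditions : List String), Dom_filter_by_conditions_py meals conditions → Spec_filter_by_conditions_py meals conditions (filter_by_conditions_py meals conditions)

-- ===== LEMMAS AND PROOFS =====

-- A's chain of conditional filters equals B's single filter by the flag-guarded predicate.
theorem filters_eq (meals : List (List (String × Int))) (conditions : List String) :
    (let filtered := meals
     let filtered := if conditions.contains "diabetes" then
         filtered.filter (fun m => decide (pvGet0 m "sugar_g" < 20) && decide (pvGet0 m "fiber_g" > 3))
       else filtered
     let filtered := if conditions.contains "hypertension" then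
         filtered.filter (fun m => decide (pvGet0 m "sodium_mg" < 500))
       else filtered
     if conditions.contains "high_cholesterol" then
         filtered.filter (fun m => decide (pvGet0 m "fat_g" < 15))
       else filtered) =
    meals.filter (pvMealOk (conditions.contains "diabetes") (conditions.contains "hypertension")
      (conditions.contains "high_cholesterol")) := by
  cases hd : conditions.contains "diabetes" <;>
  cases hh : conditions.contains "hypertension" <;>
  cases hc : conditions.contains "high_cholesterol" <;>
    simp [List.filter_filter] <;>
    first
      | (symm; rw [List.filter_eq_self]; intro m _; simp [pvMealOk])
      | (apply List.filter_congr; intro m _;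
         by_cases h1 : pvGet0 m "sugar_g" < 20 <;>
         by_cases h2 : pvGet0 m "fiber_g" > 3 <;>
         by_cases h3 : (500 : Int) ≤ pvGet0 m "sodium_mg" <;>
         by_cases h4 : (15 : Int) ≤ pvGet0 m "fat_g" <;>
           simp_all [pvMealOk, not_le, not_lt])

-- ===== VERDICT (by name: the statement is the Claim_ definition above) =====
theorem filter_by_conditions_py_spec : Claim_equal_filter_by_conditions_py := by
  intro meals conditions _
  unfold Spec_filter_by_conditions_py filter_by_conditions_py filter_by_conditions_py_alt
  simp only []
  rw [filters_eq]
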